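-- pv_equiv track=rewrite | github.com/hadangquoctoan/apache-error-detect-ai | app/services/investigation_focus.py | annotate_issue_roles
-- ===== SOURCE A (Python) =====
-- from typing import List, Dict, Any
--
-- def is_backend_related_label(label: str) -> bool:
--     label = (label or "").lower()
--     return any(x in label for x in [
--         "workerenv",
--         "scoreboard",
--         "child initialization",
--         "mod_jk",
--         "backend",
--         "ajp",
--     ])
--
-- def is_access_related_label(label: str) -> bool:
--     label = (label or "").lower()
--     return any(x in label for x in [
--         "directory access",
--         "client access",
--         "forbidden",
--         "htaccess",
--     ])
--
-- def annotate_issue_roles(clusters: List[Dict[str, Any]], focus_mode: str) -> tuple[str, List[str]]: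
--     if not clusters:
--         return "", []
--
--     primary_issue = clusters[0].get("label", "")
--     secondary_issues = [c.get("label", "") for c in clusters[1:] if c.get("label", "")]
--
--     if focus_mode == "backend_connectivity":
--         backend_first = [c.get("label", "") for c in clusters if is_backend_related_label(c.get("label", ""))]
--         non_backend = [c.get("label", "") for c in clusters if not is_backend_related_label(c.get("label", ""))]
--         if backend_first:
--             primary_issue = backend_first[0]
--             secondary_issues = backend_first[1:] + non_backend
--
--     if focus_mode == "access_control":
--         access_first = [c.get("label", "") for c in clusters if is_access_related_label(c.get("label", ""))]
--         non_access = [c.get("label", "") for c in clusters if not is_access_related_label(c.get("label", ""))]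
--         if access_first:
--             primary_issue = access_first[0]
--             secondary_issues = access_first[1:] + non_access
--
--     seen = set()
--     dedup_secondary = []
--     for item in secondary_issues:
--         if item and item != primary_issue and item not in seen:
--             seen.add(item)
--             dedup_secondary.append(item)
--
--     return primary_issue, dedup_secondary[:3]
-- ===== SOURCE B (Python) =====
-- # B: pick the focus predicate once, reorder labels with one stable sort, and
-- # dedup via dict.fromkeys on a filtered slice (simpler: no duplicated filter blocks).
-- def is_backend_related_label(label: str) -> bool:
--     label = (label or "").lower()
--     return any(x in label for x in [
--         "workerenv", "scoreboard", "child initialization", "mod_jk", "backend", "ajp",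
--     ])
--
-- def is_access_related_label(label: str) -> bool:
--     label = (label or "").lower()
--     return any(x in label for x in [
--         "directory access", "client access", "forbidden", "htaccess",
--     ])
--
-- def annotate_issue_roles(clusters, focus_mode):
--     if not clusters:
--         return "", []
--     if focus_mode == "backend_connectivity":
--         match = is_backend_related_label
--     elif focus_mode == "access_control":
--         match = is_access_related_label
--     else:
--         match = None
--     labels = [c.get("label", "") for c in clusters]
--     if match is not None:
--         labels = sorted(labels, key=lambda l: not match(l))
--     primary = labels[0]
--     secondary = list(dict.fromkeys(l for l in labels[1:] if l and l != primary))
--     return primary, secondary[:3]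
-- ===== Notes on version B (the rewrite author's own statement) =====
-- stated objective: simpler
-- what changed: B replaces A's two duplicated per-mode filter/concatenate blocks by selecting the focus predicate once and applying a single stable Bool-key sort to the label list, and replaces the hand-written seen-set dedup loop by dict.fromkeys over a filtered slice.
import Mathlib
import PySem

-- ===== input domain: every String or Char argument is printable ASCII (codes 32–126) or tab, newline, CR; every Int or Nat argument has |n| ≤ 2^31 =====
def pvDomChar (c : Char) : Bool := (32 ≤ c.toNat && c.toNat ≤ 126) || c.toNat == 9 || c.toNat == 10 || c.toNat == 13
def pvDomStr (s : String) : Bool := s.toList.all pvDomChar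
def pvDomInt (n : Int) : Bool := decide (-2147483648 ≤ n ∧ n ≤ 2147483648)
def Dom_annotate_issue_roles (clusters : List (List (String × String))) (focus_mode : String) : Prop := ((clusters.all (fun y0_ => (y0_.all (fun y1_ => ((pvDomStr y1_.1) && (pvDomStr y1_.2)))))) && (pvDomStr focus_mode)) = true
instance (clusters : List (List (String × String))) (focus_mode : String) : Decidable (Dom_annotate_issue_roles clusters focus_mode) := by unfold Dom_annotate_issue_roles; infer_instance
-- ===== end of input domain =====

-- B replaces A's two per-mode filter blocks by one stable Bool-key sort and the
-- hand-written seen-set loop by dict.fromkeys dedup of a filtered slice (objective: simpler).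

-- ===== PORT A =====
-- (label or "").lower(): on a String argument `label or ""` is `label` itself
def is_backend_related_label (label : String) : Bool :=
  let l := PySem.Str.lower label
  ["workerenv", "scoreboard", "child initialization", "mod_jk", "backend", "ajp"].any
    (fun x => PySem.Str.isIn x l)

def is_access_related_label (label : String) : Bool :=
  let l := PySem.Str.lower label
  ["directory access", "client access", "forbidden", "htaccess"].any
    (fun x => PySem.Str.isIn x l)

-- c.get("label", "")
def pvGetLabel (c : List (String × String)) : String := PySem.Dict.getD ⟨c⟩ "label" ""

def annotate_issue_roles (clusters : List (List (String × String))) (focus_mode : String) : String × List String :=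
  match clusters with
  | [] => ("", [])
  | c0 :: rest =>
    let primary_issue := pvGetLabel c0
    let secondary_issues := (rest.filter (fun c => pvGetLabel c != "")).map pvGetLabel
    let ps1 : String × List String :=
      if focus_mode == "backend_connectivity" then
        let backend_first := ((c0 :: rest).filter (fun c => is_backend_related_label (pvGetLabel c))).map pvGetLabel
        let non_backend := ((c0 :: rest).filter (fun c => !is_backend_related_label (pvGetLabel c))).map pvGetLabel
        match backend_first with
        | b0 :: bs => (b0, bs ++ non_backend)
        | [] => (primary_issue, secondary_issues)
      else (primary_issue, secondary_issues)
    let ps2 : String × List String :=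
      if focus_mode == "access_control" then
        let access_first := ((c0 :: rest).filter (fun c => is_access_related_label (pvGetLabel c))).map pvGetLabel
        let non_access := ((c0 :: rest).filter (fun c => !is_access_related_label (pvGetLabel c))).map pvGetLabel
        match access_first with
        | a0 :: as_ => (a0, as_ ++ non_access)
        | [] => ps1
      else ps1
    -- seen-set dedup loop; dedup_secondary[:3] is List.take 3 (exact: nonnegative stop)
    let dedup := ((ps2.2).foldl
      (fun (st : PySem.Set String × List String) item =>
        if item != "" && item != ps2.1 && !(st.1.contains item) then (st.1.add item, st.2 ++ [item]) else st)
      (PySem.Set.empty, [])).2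
    (ps2.1, dedup.take 3)

-- ===== PORT B =====
def annotate_issue_roles_alt (clusters : List (List (String × String))) (focus_mode : String) : String × List String :=
  match clusters with
  | [] => ("", [])
  | _ :: _ =>
    let mtch : Option (String → Bool) :=
      if focus_mode == "backend_connectivity" then some is_backend_related_label
      else if focus_mode == "access_control" then some is_access_related_label
      else none
    let labels := clusters.map pvGetLabel
    let labels := match mtch with
      | some k => PySem.List.sorted labels (fun l => !(k l))
      | none => labels
    -- labels is nonempty here (clusters ≠ [] and sorted keeps all elements), so labels[0] = headD
    let primary := labels.headD ""
    let secondary := PySem.List.dedup ((labels.tail).filter (fun l => l != "" && l != primary))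
    (primary, secondary.take 3)

-- ===== PRECONDITION & SPEC =====
def Spec_annotate_issue_roles (clusters : List (List (String × String))) (focus_mode : String) (out : String × List String) : Prop := out = annotate_issue_roles_alt clusters focus_mode
instance (clusters : List (List (String × String))) (focus_mode : String) (out : String × List String) : Decidable (Spec_annotate_issue_roles clusters focus_mode out) := by unfold Spec_annotate_issue_roles; infer_instance

-- ===== CLAIM (what is proved, stated in full; the proofs are below) =====
def Claim_equal_annotate_issue_roles : Prop := ∀ (clusters : List (List (String × String))) (focus_mode : String), Dom_annotate_issue_roles clusters focus_mode → Spec_annotate_issue_roles clusters focus_mode (annotate_issue_roles clusters focus_mode)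

-- ===== LEMMAS AND PROOFS =====

-- inserting a false-key element lands at the end of the false block
theorem insertBy_false_block (key : String → Bool) (x : String) (F T : List String)
    (hx : key x = false) (hF : ∀ y ∈ F, key y = false) (hT : ∀ y ∈ T, key y = true) :
    PySem.List.insertBy (fun a b => decide (key a < key b)) x (F ++ T) = F ++ x :: T := by
  induction F with
  | nil =>
    cases T with
    | nil => simp [PySem.List.insertBy]
    | cons t ts =>
      have ht : key t = true := hT t (by simp)
      simp [PySem.List.insertBy, hx, ht]
  | cons f fs ih =>
    have hf : key f = false := hF f (by simp)
    simp only [List.cons_append, PySem.List.insertBy, hx, hf]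
    simp [ih (fun y hy => hF y (by simp [hy]))]

-- stable sort by a Bool key is the stable partition
theorem sorted_bool_partition (key : String → Bool) (xs : List String) :
    PySem.List.sorted xs key = xs.filter (fun a => !key a) ++ xs.filter key := by
  rw [PySem.List.sorted_eq_foldl_insertBy]
  suffices h : ∀ (l : List String) (F T : List String),
      (∀ y ∈ F, key y = false) → (∀ y ∈ T, key y = true) →
      l.foldl (fun acc x => PySem.List.insertBy (fun a b => decide (key a < key b)) x acc) (F ++ T)
        = (F ++ l.filter (fun a => !key a)) ++ (T ++ l.filter key) by
    simpa using h xs [] [] (by simp) (by simp)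
  intro l
  induction l with
  | nil => intro F T _ _; simp
  | cons x xs ih =>
    intro F T hF hT
    cases hx : key x with
    | true =>
      have hins : PySem.List.insertBy (fun a b => decide (key a < key b)) x (F ++ T)
          = (F ++ T) ++ [x] := by
        apply PySem.List.insertBy_of_forall_not_before
        intro y _; rw [hx]; cases key y <;> decide
      have hT' : ∀ y ∈ T ++ [x], key y = true := by
        intro y hy
        rcases List.mem_append.mp hy with h | h
        · exact hT y h
        · simp at h; subst h; exact hx
      rw [List.foldl_cons, hins, List.append_assoc, ih F (T ++ [x]) hF hT']
      simp [hx]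
    | false =>
      have hF' : ∀ y ∈ F ++ [x], key y = false := by
        intro y hy
        rcases List.mem_append.mp hy with h | h
        · exact hF y h
        · simp at h; subst h; exact hx
      have hsplit : F ++ x :: T = (F ++ [x]) ++ T := by simp
      rw [List.foldl_cons, insertBy_false_block key x F T hx hF hT, hsplit,
        ih (F ++ [x]) T hF' hT]
      simp [hx]

-- A's seen-set loop is dedup of the filtered list
theorem loop_eq_dedup_filter (primary : String) (xs : List String) :
    (xs.foldl
      (fun (st : PySem.Set String × List String) item =>
        if item != "" && item != primary && !(st.1.contains item) then (st.1.add item, st.2 ++ [item]) else st)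
      (PySem.Set.empty, [])).2
    = PySem.List.dedup (xs.filter (fun l => l != "" && l != primary)) := by
  have h : ∀ (l : List String) (acc : List String),
      l.foldl
        (fun (st : PySem.Set String × List String) item =>
          if item != "" && item != primary && !(st.1.contains item) then (st.1.add item, st.2 ++ [item]) else st)
        (acc, acc)
      = ((l.filter (fun l => l != "" && l != primary)).foldl PySem.Set.add acc,
         (l.filter (fun l => l != "" && l != primary)).foldl PySem.Set.add acc) := by
    intro l
    induction l with
    | nil => intro acc; simp
    | cons x xs ih =>
      intro acc
      rw [List.filter_cons]
      have hinit : List.foldl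
          (fun (st : PySem.Set String × List String) item =>
            if item != "" && item != primary && !(st.1.contains item) then (st.1.add item, st.2 ++ [item]) else st)
          (acc, acc) (x :: xs)
        = List.foldl
          (fun (st : PySem.Set String × List String) item =>
            if item != "" && item != primary && !(st.1.contains item) then (st.1.add item, st.2 ++ [item]) else st)
          (if x != "" && x != primary then (PySem.Set.add acc x, PySem.Set.add acc x) else (acc, acc)) xs := by
        rw [List.foldl_cons]
        congr 1
        by_cases hc : x ∈ acc <;> cases hP : (x != "" && x != primary) <;>
          simp [PySem.Set.add, hc]
      rw [hinit]
      by_cases hP : (x != "" && x != primary) = true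
      · rw [if_pos hP, if_pos hP, List.foldl_cons]
        exact ih (PySem.Set.add acc x)
      · rw [if_neg hP, if_neg hP]
        exact ih acc
  have := h xs []
  simp only [PySem.List.dedup, PySem.Set.ofList, PySem.Set.empty] at *
  rw [this]

-- the final dedup/take stage agrees once primary and the pre-dedup lists' filtrates agree
theorem tail_stage_eq (primary : String) (sec tailB : List String)
    (hsec : sec.filter (fun l => l != "" && l != primary)
          = tailB.filter (fun l => l != "" && l != primary)) :
    ((sec.foldl
      (fun (st : PySem.Set String × List String) item =>
        if item != "" && item != primary && !(st.1.contains item) then (st.1.add item, st.2 ++ [item]) else st)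
      (PySem.Set.empty, [])).2).take 3
    = (PySem.List.dedup (tailB.filter (fun l => l != "" && l != primary))).take 3 := by
  rw [loop_eq_dedup_filter primary sec, hsec]

-- filtering the nonempty-label comprehension again by a condition implying nonempty
theorem filter_secondary (rest : List (List (String × String))) (primary : String) :
    ((rest.filter (fun c => pvGetLabel c != "")).map pvGetLabel).filter (fun l => l != "" && l != primary)
    = (rest.map pvGetLabel).filter (fun l => l != "" && l != primary) := by
  rw [List.filter_map, List.filter_map, List.filter_filter]
  congr 1
  apply List.filter_congr
  intro c _
  simp [Function.comp]
  tauto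

-- the whole tail of both programs, for a focus mode whose predicate is `pred`
theorem focus_mode_eq (pred : String → Bool) (c0 : List (String × String)) (rest : List (List (String × String))) :
    (let ps : String × List String :=
       match (((c0 :: rest).filter (fun c => pred (pvGetLabel c))).map pvGetLabel) with
       | b0 :: bs => (b0, bs ++ ((c0 :: rest).filter (fun c => !pred (pvGetLabel c))).map pvGetLabel)
       | [] => (pvGetLabel c0, (rest.filter (fun c => pvGetLabel c != "")).map pvGetLabel)
     (ps.1, ((ps.2.foldl
       (fun (st : PySem.Set String × List String) item =>
         if item != "" && item != ps.1 && !(st.1.contains item) then (st.1.add item, st.2 ++ [item]) else st)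
       (PySem.Set.empty, [])).2).take 3))
    = (let labels := PySem.List.sorted ((c0 :: rest).map pvGetLabel) (fun l => !(pred l))
       (labels.headD "", (PySem.List.dedup ((labels.tail).filter (fun l => l != "" && l != labels.headD ""))).take 3)) := by
  have hAfilt : ((c0 :: rest).filter (fun c => pred (pvGetLabel c))).map pvGetLabel
      = ((c0 :: rest).map pvGetLabel).filter pred := by
    rw [List.filter_map]; exact rfl
  have hAfilt' : ((c0 :: rest).filter (fun c => !pred (pvGetLabel c))).map pvGetLabel
      = ((c0 :: rest).map pvGetLabel).filter (fun a => !pred a) := by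
    rw [List.filter_map]; exact rfl
  have hsort : PySem.List.sorted ((c0 :: rest).map pvGetLabel) (fun l => !(pred l))
      = ((c0 :: rest).map pvGetLabel).filter pred
        ++ ((c0 :: rest).map pvGetLabel).filter (fun a => !pred a) := by
    rw [sorted_bool_partition]
    congr 1
    apply List.filter_congr
    intro a _; simp
  cases hbf : ((c0 :: rest).map pvGetLabel).filter pred with
  | cons b0 bs =>
    rw [hAfilt, hAfilt', hsort, hbf]
    simp only [List.cons_append, List.headD_cons, List.tail_cons]
    exact congrArg _ (tail_stage_eq b0 _ _ rfl)
  | nil =>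
    have hall : ((c0 :: rest).map pvGetLabel).filter (fun a => !pred a)
        = (c0 :: rest).map pvGetLabel := by
      rw [List.filter_eq_self]
      intro a ha
      have := List.filter_eq_nil_iff.mp hbf a ha
      simp at this ⊢
      simp [this]
    rw [hAfilt, hAfilt', hsort, hbf, hall]
    simp only [List.nil_append, List.map_cons, List.headD_cons, List.tail_cons]
    exact congrArg _ (tail_stage_eq (pvGetLabel c0) _ _ (filter_secondary rest (pvGetLabel c0)))

-- the whole tail of both programs, in the default mode
theorem default_mode_eq (c0 : List (String × String)) (rest : List (List (String × String))) :
    (pvGetLabel c0,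
      ((((rest.filter (fun c => pvGetLabel c != "")).map pvGetLabel).foldl
        (fun (st : PySem.Set String × List String) item =>
          if item != "" && item != pvGetLabel c0 && !(st.1.contains item) then (st.1.add item, st.2 ++ [item]) else st)
        (PySem.Set.empty, [])).2).take 3)
    = (let labels := (c0 :: rest).map pvGetLabel
       (labels.headD "", (PySem.List.dedup ((labels.tail).filter (fun l => l != "" && l != labels.headD ""))).take 3)) := by
  simp only [List.map_cons, List.headD_cons, List.tail_cons]
  exact congrArg _ (tail_stage_eq (pvGetLabel c0) _ _ (filter_secondary rest (pvGetLabel c0)))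

theorem annotate_eq (clusters : List (List (String × String))) (focus_mode : String) :
    annotate_issue_roles clusters focus_mode = annotate_issue_roles_alt clusters focus_mode := by
  cases clusters with
  | nil => rfl
  | cons c0 rest =>
    by_cases hb : focus_mode = "backend_connectivity"
    · subst hb
      simp only [annotate_issue_roles, annotate_issue_roles_alt]
      simp only [show (("backend_connectivity" : String) == "backend_connectivity") = true from by decide,
        show (("backend_connectivity" : String) == "access_control") = false from by decide,
        if_true, if_false, Bool.false_eq_true]
      exact focus_mode_eq is_backend_related_label c0 rest
    · by_cases ha : focus_mode = "access_control"
      · subst ha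
        simp only [annotate_issue_roles, annotate_issue_roles_alt]
        simp only [show (("access_control" : String) == "backend_connectivity") = false from by decide,
          show (("access_control" : String) == "access_control") = true from by decide,
          if_true, if_false, Bool.false_eq_true]
        exact focus_mode_eq is_access_related_label c0 rest
      · have hb' : (focus_mode == "backend_connectivity") = false := by
          simp [hb]
        have ha' : (focus_mode == "access_control") = false := by
          simp [ha]
        simp only [annotate_issue_roles, annotate_issue_roles_alt, hb', ha',
          Bool.false_eq_true, ite_false]
        exact default_mode_eq c0 rest

-- ===== VERDICT (by name: the statement is the Claim_ definition above) =====
theorem annotate_issue_roles_spec : Claim_equal_annotate_issue_roles := by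
  intro clusters focus_mode _
  exact annotate_eq clusters focus_mode
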